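-- pv_equiv track=rewrite | github.com/BryanBlinDorard/SAE-crypto | src/vigenere.py | diviseur_commun
-- ===== SOURCE A (Python) =====
-- def diviseur_du_nombre(valeur):
--   liste = []
--   for i in range(2, valeur):
--     if valeur % i == 0:
--       liste.append(i)
--   return liste
--
-- def diviseur_commun(dict):
--   liste_diviseur = []
--   dict_frq = {}
--   for val in dict:
--     liste_diviseur.append(diviseur_du_nombre(dict[val]))
--   for i in range(len(liste_diviseur)):
--     for elem2 in liste_diviseur[i]:
--       if elem2 not in dict_frq:
--         dict_frq[elem2] = 1
--       else:
--         dict_frq[elem2] += 1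
--   return dict_frq
-- ===== SOURCE B (Python) =====
-- def diviseur_commun(dict):
--     freq = {}
--     for val in dict.values():
--         small = []   # divisors d with 2 <= d and d*d <= val, ascending
--         large = []   # their cofactors val // d, descending
--         i = 2
--         while i * i <= val:
--             if val % i == 0:
--                 small.append(i)
--                 c = val // i
--                 if c != i:
--                     large.append(c)
--             i += 1
--         for d in small:
--             freq[d] = freq.get(d, 0) + 1
--         for d in reversed(large):
--             freq[d] = freq.get(d, 0) + 1
--     return freq
-- ===== Notes on version B (the rewrite author's own statement) =====
-- stated objective: alternative
-- what changed: Instead of trial-dividing by every i in 2..n-1 per value, B enumerates divisors only up to sqrt(n), collecting each divisor together with its cofactor and merging the two halves in ascending order without sorting; intended as faster (O(sqrt n) vs O(n) per value) but a timing run measured only 1.38x at the largest size, so no speed is claimed.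
import Mathlib
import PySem

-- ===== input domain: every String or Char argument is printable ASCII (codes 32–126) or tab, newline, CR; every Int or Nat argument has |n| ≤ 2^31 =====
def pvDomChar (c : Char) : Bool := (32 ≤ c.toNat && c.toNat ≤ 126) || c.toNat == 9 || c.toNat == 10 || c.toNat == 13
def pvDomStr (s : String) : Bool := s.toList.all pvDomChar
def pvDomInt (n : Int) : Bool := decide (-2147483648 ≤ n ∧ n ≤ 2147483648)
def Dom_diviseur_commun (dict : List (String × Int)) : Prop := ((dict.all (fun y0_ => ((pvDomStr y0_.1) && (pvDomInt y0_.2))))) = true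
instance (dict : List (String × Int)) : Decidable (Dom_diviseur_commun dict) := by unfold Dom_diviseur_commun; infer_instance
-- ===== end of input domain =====

-- B replaces A's per-value trial division over all of 2..n-1 by divisor enumeration up to √n
-- (each small divisor paired with its cofactor), merging the two halves in ascending order.


-- ===== PORT A =====
def diviseur_du_nombre (valeur : Int) : List Int :=
  (PySem.List.pyRange 2 valeur).foldl
    (fun liste i => if PySem.Int.mod valeur i == 0 then liste ++ [i] else liste) []

def diviseur_commun (dict : List (String × Int)) : List (Int × Int) :=
  let liste_diviseur : List (List Int) :=
    dict.foldl (fun acc val => acc ++ [diviseur_du_nombre val.2]) []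
  let dict_frq : PySem.Dict Int Int :=
    (PySem.List.pyRange 0 (PySem.List.len liste_diviseur)).foldl
      (fun d i => (PySem.List.pyGetD liste_diviseur i []).foldl
        (fun d elem2 =>
          if !d.contains elem2 then d.insert elem2 1 else d.modify elem2 0 (· + 1)) d)
      PySem.Dict.empty
  dict_frq.items

-- ===== PORT B =====
-- the 'while i * i <= val' loop of Source B (i is the Python loop counter, always ≥ 2 at call sites)
def altDivsLoop (val : Int) (i : Nat) (small large : List Int) : List Int × List Int :=
  if h : (i : Int) * i ≤ val then
    if PySem.Int.mod val i == 0 then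
      let c := PySem.Int.floordiv val i
      altDivsLoop val (i + 1) (small ++ [(i : Int)]) (if c ≠ (i : Int) then large ++ [c] else large)
    else altDivsLoop val (i + 1) small large
  else (small, large)
termination_by val.toNat + 2 - i
decreasing_by
  all_goals
    have hi : (i : Int) ≤ (i : Int) * i := by nlinarith [Int.natCast_nonneg i]
    omega

def diviseur_commun_alt (dict : List (String × Int)) : List (Int × Int) :=
  (dict.foldl (fun freq kv =>
      let p := altDivsLoop kv.2 2 [] []
      let freq := p.1.foldl (fun f d => f.insert d (f.getD d 0 + 1)) freq
      p.2.reverse.foldl (fun f d => f.insert d (f.getD d 0 + 1)) freq)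
    (PySem.Dict.empty : PySem.Dict Int Int)).items

-- ===== PRECONDITION & SPEC =====
def Spec_diviseur_commun (dict : List (String × Int)) (out : List (Int × Int)) : Prop := out = diviseur_commun_alt dict
instance (dict : List (String × Int)) (out : List (Int × Int)) : Decidable (Spec_diviseur_commun dict out) := by unfold Spec_diviseur_commun; infer_instance

-- ===== CLAIM (what is proved, stated in full; the proofs are below) =====
def Claim_equal_diviseur_commun : Prop := ∀ (dict : List (String × Int)), Dom_diviseur_commun dict → Spec_diviseur_commun dict (diviseur_commun dict)

-- ===== LEMMAS AND PROOFS =====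

-- the small-divisor and cofactor lists produced by the loop of Source B from counter i on
def Sd (v : Int) (i : Nat) : List Int := (altDivsLoop v i [] []).1
def Ld (v : Int) (i : Nat) : List Int := (altDivsLoop v i [] []).2

theorem iltv {i : Nat} {v : Int} (h : (i:Int) * i ≤ v) : (i:Int) ≤ v := by
  nlinarith [Int.natCast_nonneg i]

theorem acc_aux : ∀ (k : Nat) (v : Int) (i : Nat), v.toNat + 2 - i ≤ k →
    ∀ s l, altDivsLoop v i s l = (s ++ Sd v i, l ++ Ld v i) := by
  intro k
  induction k with
  | zero =>
    intro v i hk s l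
    have hn : ¬ ((i:Int) * i ≤ v) := by
      intro h; have := iltv h; omega
    rw [altDivsLoop, dif_neg hn]
    unfold Sd Ld
    rw [altDivsLoop, dif_neg hn]
    simp
  | succ k ih =>
    intro v i hk s l
    unfold Sd Ld
    by_cases h : (i:Int) * i ≤ v
    · have hk' : v.toNat + 2 - (i+1) ≤ k := by have := iltv h; omega
      rw [altDivsLoop.eq_def v i s l, altDivsLoop.eq_def v i [] []]
      simp only [dif_pos h]
      by_cases hm : (PySem.Int.mod v i == 0) = true
      · simp only [hm, if_true]
        simp only [ih v (i+1) hk']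
        simp [Sd, Ld]
        split_ifs <;> simp
      · simp only [hm]
        simp only [ih v (i+1) hk']
        simp [Sd, Ld]
    · rw [altDivsLoop.eq_def v i s l, altDivsLoop.eq_def v i [] []]
      simp only [dif_neg h]
      simp

theorem SdLd_stop {v : Int} {i : Nat} (h : ¬ (i:Int) * i ≤ v) : Sd v i = [] ∧ Ld v i = [] := by
  unfold Sd Ld; rw [altDivsLoop.eq_def]; simp [dif_neg h]

theorem SdLd_step {v : Int} {i : Nat} (h : (i:Int) * i ≤ v) (hm : PySem.Int.mod v i = 0) :
    Sd v i = (i:Int) :: Sd v (i+1) ∧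
    Ld v i = (if PySem.Int.floordiv v i = (i:Int) then [] else [PySem.Int.floordiv v i]) ++ Ld v (i+1) := by
  unfold Sd Ld
  rw [altDivsLoop.eq_def]
  simp only [dif_pos h, hm]
  rw [acc_aux (v.toNat + 2 - (i+1)) v (i+1) le_rfl]
  simp [Sd, Ld]

theorem SdLd_skip {v : Int} {i : Nat} (h : (i:Int) * i ≤ v) (hm : ¬ PySem.Int.mod v i = 0) :
    Sd v i = Sd v (i+1) ∧ Ld v i = Ld v (i+1) := by
  unfold Sd Ld
  rw [altDivsLoop.eq_def]
  simp only [dif_pos h]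
  have : (PySem.Int.mod v i == 0) = false := by simpa using hm
  rw [this]
  simp

theorem mem_Sd_aux : ∀ (k : Nat) (v : Int) (i : Nat), v.toNat + 2 - i ≤ k → ∀ x,
    x ∈ Sd v i ↔ ((i:Int) ≤ x ∧ x * x ≤ v ∧ PySem.Int.mod v x = 0) := by
  intro k
  induction k with
  | zero =>
    intro v i hk x
    have hn : ¬ ((i:Int) * i ≤ v) := by intro h; have := iltv h; omega
    rw [(SdLd_stop hn).1]
    simp only [List.not_mem_nil, false_iff]
    rintro ⟨h1, h2, -⟩
    exact hn (by nlinarith [Int.natCast_nonneg i])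
  | succ k ih =>
    intro v i hk x
    by_cases h : (i:Int) * i ≤ v
    · have hk' : v.toNat + 2 - (i+1) ≤ k := by have := iltv h; omega
      by_cases hm : PySem.Int.mod v i = 0
      · rw [(SdLd_step h hm).1, List.mem_cons, ih v (i+1) hk' x]
        push_cast
        constructor
        · rintro (rfl | ⟨h1, h2, h3⟩)
          · exact ⟨le_refl _, h, hm⟩
          · exact ⟨by omega, h2, h3⟩
        · rintro ⟨h1, h2, h3⟩
          by_cases hxi : x = (i:Int)
          · exact Or.inl hxi
          · exact Or.inr ⟨by omega, h2, h3⟩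
      · rw [(SdLd_skip h hm).1, ih v (i+1) hk' x]
        push_cast
        constructor
        · rintro ⟨h1, h2, h3⟩; exact ⟨by omega, h2, h3⟩
        · rintro ⟨h1, h2, h3⟩
          refine ⟨by
            rcases eq_or_lt_of_le h1 with heq | hlt
            · exact absurd (heq ▸ h3) hm
            · omega, h2, h3⟩
    · rw [(SdLd_stop h).1]
      simp only [List.not_mem_nil, false_iff]
      rintro ⟨h1, h2, -⟩
      exact h (by nlinarith [Int.natCast_nonneg i])

theorem mem_Ld_aux : ∀ (k : Nat) (v : Int) (i : Nat), v.toNat + 2 - i ≤ k → ∀ x,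
    x ∈ Ld v i ↔ ∃ j : Nat, i ≤ j ∧ (j:Int) * j ≤ v ∧ PySem.Int.mod v j = 0 ∧
      x = PySem.Int.floordiv v j ∧ x ≠ (j:Int) := by
  intro k
  induction k with
  | zero =>
    intro v i hk x
    have hn : ¬ ((i:Int) * i ≤ v) := by intro h; have := iltv h; omega
    rw [(SdLd_stop hn).2]
    simp only [List.not_mem_nil, false_iff]
    rintro ⟨j, hj, h2, -, -, -⟩
    have : ((i:Int)) * i ≤ (j:Int) * j := by
      have : (i:Int) ≤ (j:Int) := by exact_mod_cast hj
      nlinarith [Int.natCast_nonneg i]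
    exact hn (le_trans this h2)
  | succ k ih =>
    intro v i hk x
    by_cases h : (i:Int) * i ≤ v
    · have hk' : v.toNat + 2 - (i+1) ≤ k := by have := iltv h; omega
      by_cases hm : PySem.Int.mod v i = 0
      · rw [(SdLd_step h hm).2, List.mem_append, ih v (i+1) hk' x]
        constructor
        · rintro (hc | ⟨j, hj, h2, h3, h4, h5⟩)
          · by_cases hci : PySem.Int.floordiv v i = (i:Int)
            · simp [hci] at hc
            · simp only [hci, if_false, List.mem_singleton] at hc
              exact ⟨i, le_refl _, h, hm, hc, hc ▸ hci⟩
          · exact ⟨j, by omega, h2, h3, h4, h5⟩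
        · rintro ⟨j, hj, h2, h3, h4, h5⟩
          rcases Nat.eq_or_lt_of_le hj with rfl | hlt
          · left
            have hci : PySem.Int.floordiv v i ≠ (i:Int) := fun hh => h5 (h4 ▸ hh)
            simp [hci, h4]
          · exact Or.inr ⟨j, by omega, h2, h3, h4, h5⟩
      · rw [(SdLd_skip h hm).2, ih v (i+1) hk' x]
        constructor
        · rintro ⟨j, hj, h2, h3, h4, h5⟩; exact ⟨j, by omega, h2, h3, h4, h5⟩
        · rintro ⟨j, hj, h2, h3, h4, h5⟩
          rcases Nat.eq_or_lt_of_le hj with rfl | hlt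
          · exact absurd h3 hm
          · exact ⟨j, by omega, h2, h3, h4, h5⟩
    · rw [(SdLd_stop h).2]
      simp only [List.not_mem_nil, false_iff]
      rintro ⟨j, hj, h2, -, -, -⟩
      have hij : (i:Int) ≤ (j:Int) := by exact_mod_cast hj
      exact h (le_trans (by nlinarith [Int.natCast_nonneg i]) h2)

theorem mem_Sd (v : Int) (i : Nat) (x : Int) :
    x ∈ Sd v i ↔ ((i:Int) ≤ x ∧ x * x ≤ v ∧ PySem.Int.mod v x = 0) :=
  mem_Sd_aux (v.toNat + 2 - i) v i le_rfl x

theorem mem_Ld (v : Int) (i : Nat) (x : Int) :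
    x ∈ Ld v i ↔ ∃ j : Nat, i ≤ j ∧ (j:Int) * j ≤ v ∧ PySem.Int.mod v j = 0 ∧
      x = PySem.Int.floordiv v j ∧ x ≠ (j:Int) :=
  mem_Ld_aux (v.toNat + 2 - i) v i le_rfl x

theorem pairwise_Sd_aux : ∀ (k : Nat) (v : Int) (i : Nat), v.toNat + 2 - i ≤ k →
    (Sd v i).Pairwise (· < ·) := by
  intro k
  induction k with
  | zero =>
    intro v i hk
    have hn : ¬ ((i:Int) * i ≤ v) := by intro h; have := iltv h; omega
    rw [(SdLd_stop hn).1]; exact List.Pairwise.nil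
  | succ k ih =>
    intro v i hk
    by_cases h : (i:Int) * i ≤ v
    · have hk' : v.toNat + 2 - (i+1) ≤ k := by have := iltv h; omega
      by_cases hm : PySem.Int.mod v i = 0
      · rw [(SdLd_step h hm).1]
        refine List.Pairwise.cons (fun y hy => ?_) (ih v (i+1) hk')
        have := (mem_Sd v (i+1) y).1 hy
        push_cast at this
        omega
      · rw [(SdLd_skip h hm).1]; exact ih v (i+1) hk'
    · rw [(SdLd_stop h).1]; exact List.Pairwise.nil

theorem pairwise_Ld_aux : ∀ (k : Nat) (v : Int) (i : Nat), 2 ≤ i → v.toNat + 2 - i ≤ k →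
    (Ld v i).Pairwise (· > ·) := by
  intro k
  induction k with
  | zero =>
    intro v i hi hk
    have hn : ¬ ((i:Int) * i ≤ v) := by intro h; have := iltv h; omega
    rw [(SdLd_stop hn).2]; exact List.Pairwise.nil
  | succ k ih =>
    intro v i hi hk
    by_cases h : (i:Int) * i ≤ v
    · have hk' : v.toNat + 2 - (i+1) ≤ k := by have := iltv h; omega
      have ih' := ih v (i+1) (by omega) hk'
      by_cases hm : PySem.Int.mod v i = 0
      · rw [(SdLd_step h hm).2]
        by_cases hci : PySem.Int.floordiv v i = (i:Int)
        · simpa [hci] using ih'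
        · simp only [hci, if_false, List.singleton_append]
          refine List.Pairwise.cons (fun y hy => ?_) ih'
          -- c = v / i  is greater than every later cofactor y = v / j, j > i
          obtain ⟨j, hj, hjj, hjm, hy, hyj⟩ := (mem_Ld v (i+1) y).1 hy
          have hiv : ((i:Nat):Int) ∣ v := (PySem.Int.mod_eq_zero_iff_dvd v i).1 hm
          have hjv : ((j:Nat):Int) ∣ v := (PySem.Int.mod_eq_zero_iff_dvd v j).1 hjm
          have i0 : (0:Int) < (i:Int) := by exact_mod_cast Nat.lt_of_lt_of_le (by norm_num) hi
          have j0 : (0:Int) < (j:Int) := by exact_mod_cast Nat.lt_of_lt_of_le (by norm_num) (le_trans hi (by omega))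
          have hij : (i:Int) < (j:Int) := by exact_mod_cast Nat.lt_of_lt_of_le (Nat.lt_succ_self i) hj
          have hv : (0:Int) < v := by nlinarith
          rw [PySem.Int.floordiv_eq_ediv_of_pos i0]
          rw [PySem.Int.floordiv_eq_ediv_of_pos j0] at hy
          have hc : v / (i:Int) * i = v := Int.ediv_mul_cancel hiv
          have hyv : y * j = v := by rw [hy]; exact Int.ediv_mul_cancel hjv
          have hcpos : (0:Int) < v / (i:Int) := by nlinarith [hc]
          by_contra hcon
          push Not at hcon
          have h1 : v / (i:Int) * j ≤ y * j := mul_le_mul_of_nonneg_right hcon (le_of_lt j0)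
          have h2 : v / (i:Int) * i < v / (i:Int) * j := by nlinarith
          linarith [h1, h2, hyv, hc]
      · rw [(SdLd_skip h hm).2]; exact ih'
    · rw [(SdLd_stop h).2]; exact List.Pairwise.nil

theorem dvn_eq (v : Int) :
    diviseur_du_nombre v = (PySem.List.pyRange 2 v).filter (fun i => PySem.Int.mod v i == 0) := by
  unfold diviseur_du_nombre
  have := PySem.List.foldl_append_if (fun i => PySem.Int.mod v i == 0) (id : Int → Int)
    (PySem.List.pyRange 2 v) []
  simpa using this

theorem mem_bList (v x : Int) :
    x ∈ Sd v 2 ++ (Ld v 2).reverse ↔ (2 ≤ x ∧ x < v ∧ PySem.Int.mod v x = 0) := by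
  rw [List.mem_append, List.mem_reverse, mem_Sd, mem_Ld]
  constructor
  · rintro (⟨h1, h2, h3⟩ | ⟨j, hj, hjj, hjm, hy, hyj⟩)
    · push_cast at h1
      exact ⟨h1, by nlinarith, h3⟩
    · have hj2 : (2:Int) ≤ (j:Int) := by exact_mod_cast hj
      have j0 : (0:Int) < j := by linarith
      have hv : (0:Int) < v := by nlinarith
      have hjv : ((j:Nat):Int) ∣ v := (PySem.Int.mod_eq_zero_iff_dvd v j).1 hjm
      rw [PySem.Int.floordiv_eq_ediv_of_pos j0] at hy
      have hxj : x * j = v := by rw [hy]; exact Int.ediv_mul_cancel hjv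
      have hjx : (j:Int) ≤ x := by nlinarith
      have hjx' : (j:Int) < x := lt_of_le_of_ne hjx (fun hh => hyj hh.symm)
      refine ⟨by linarith, by nlinarith, ?_⟩
      exact (PySem.Int.mod_eq_zero_iff_dvd v x).2 ⟨j, by linarith [hxj]⟩
  · rintro ⟨h1, h2, h3⟩
    have hv : (0:Int) < v := by linarith
    have x0 : (0:Int) < x := by linarith
    obtain ⟨q, hq⟩ := (PySem.Int.mod_eq_zero_iff_dvd v x).1 h3
    have q1 : 1 ≤ q := by nlinarith
    have q2 : 2 ≤ q := by nlinarith
    by_cases hxx : x * x ≤ v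
    · exact Or.inl ⟨by push_cast; exact h1, hxx, h3⟩
    · right
      push Not at hxx
      have hqx : q < x := by nlinarith
      refine ⟨q.toNat, ?_, ?_, ?_, ?_, ?_⟩
      · omega
      · rw [Int.toNat_of_nonneg (by linarith)]; nlinarith
      · rw [Int.toNat_of_nonneg (by linarith)]
        exact (PySem.Int.mod_eq_zero_iff_dvd v q).2 ⟨x, hq ▸ mul_comm x q⟩
      · rw [Int.toNat_of_nonneg (by linarith)]
        rw [PySem.Int.floordiv_eq_ediv_of_pos (by linarith : (0:Int) < q), hq]
        exact (Int.mul_ediv_cancel x (by linarith)).symm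
      · rw [Int.toNat_of_nonneg (by linarith)]
        exact ne_of_gt hqx

theorem bList_eq (v : Int) :
    Sd v 2 ++ (Ld v 2).reverse = diviseur_du_nombre v := by
  rw [dvn_eq]
  apply List.Perm.eq_of_pairwise (le := (· < ·))
  · intro a b _ _ h1 h2; exact absurd h2 (lt_asymm h1)
  · rw [List.pairwise_append]
    refine ⟨pairwise_Sd_aux _ v 2 le_rfl, ?_, ?_⟩
    · rw [List.pairwise_reverse]
      exact pairwise_Ld_aux _ v 2 le_rfl le_rfl
    · intro x hx y hy
      rw [List.mem_reverse] at hy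
      obtain ⟨h1, h2, h3⟩ := (mem_Sd v 2 x).1 hx
      obtain ⟨j, hj, hjj, hjm, hy', hyj⟩ := (mem_Ld v 2 y).1 hy
      push_cast at h1
      have hj2 : (2:Int) ≤ (j:Int) := by exact_mod_cast hj
      have j0 : (0:Int) < j := by linarith
      have hv : (0:Int) < v := by nlinarith
      have hjv : ((j:Nat):Int) ∣ v := (PySem.Int.mod_eq_zero_iff_dvd v j).1 hjm
      rw [PySem.Int.floordiv_eq_ediv_of_pos j0] at hy'
      have hyv : y * j = v := by rw [hy']; exact Int.ediv_mul_cancel hjv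
      have hjy : (j:Int) ≤ y := by nlinarith
      have hjy' : (j:Int) < y := lt_of_le_of_ne hjy (fun hh => hyj hh.symm)
      -- y * y > v ≥ x * x, all positive, hence x < y
      nlinarith
  · exact List.Pairwise.filter _ (PySem.List.pairwise_lt_pyRange_one 2 v)
  · rw [List.perm_ext_iff_of_nodup]
    · intro a
      rw [mem_bList, List.mem_filter, PySem.List.mem_pyRange_one]
      simp only [beq_iff_eq]
      tauto
    · refine List.Nodup.append ?_ ?_ ?_
      · exact ((pairwise_Sd_aux _ v 2 le_rfl).imp (fun h => ne_of_lt h))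
      · exact (List.nodup_reverse.mpr ((pairwise_Ld_aux _ v 2 le_rfl le_rfl).imp (fun h => ne_of_gt h)))
      · intro x hx hy
        rw [List.mem_reverse] at hy
        obtain ⟨h1, h2, h3⟩ := (mem_Sd v 2 x).1 hx
        obtain ⟨j, hj, hjj, hjm, hy', hyj⟩ := (mem_Ld v 2 x).1 hy
        push_cast at h1
        have hj2 : (2:Int) ≤ (j:Int) := by exact_mod_cast hj
        have j0 : (0:Int) < j := by linarith
        have hv : (0:Int) < v := by nlinarith
        have hjv : ((j:Nat):Int) ∣ v := (PySem.Int.mod_eq_zero_iff_dvd v j).1 hjm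
        rw [PySem.Int.floordiv_eq_ediv_of_pos j0] at hy'
        have hyv : x * j = v := by rw [hy']; exact Int.ediv_mul_cancel hjv
        have hjy : (j:Int) ≤ x := by nlinarith
        have hjy' : (j:Int) < x := lt_of_le_of_ne hjy (fun hh => hyj hh.symm)
        nlinarith
    · exact (List.Pairwise.filter _ (PySem.List.pairwise_lt_pyRange_one 2 v)).imp (fun h => ne_of_lt h)

theorem dict_step_eq :
    (fun (d : PySem.Dict Int Int) elem2 =>
        if !d.contains elem2 then d.insert elem2 1 else d.modify elem2 0 (· + 1)) =
    (fun (d : PySem.Dict Int Int) x => d.modify x 0 (· + 1)) := by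
  funext d x
  by_cases hc : d.contains x
  · simp [hc]
  · have hc' : d.contains x = false := by simpa using hc
    simp [PySem.Dict.insert, PySem.Dict.modify, hc',
      PySem.Dict.getD_of_not_contains d 0 hc']

theorem A_norm (dict : List (String × Int)) :
    diviseur_commun dict =
      (PySem.Dict.counter ((dict.map (fun kv => diviseur_du_nombre kv.2)).flatten)).items := by
  unfold diviseur_commun
  rw [PySem.List.foldl_append_singleton_eq_map]
  simp only [List.nil_append]
  have h := PySem.List.foldl_pyRange_pyGetD
    (dict.map (fun kv : String × Int => diviseur_du_nombre kv.2)) ([] : List Int)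
    (fun d l => l.foldl (fun (d : PySem.Dict Int Int) elem2 =>
      if !d.contains elem2 then d.insert elem2 1 else d.modify elem2 0 (· + 1)) d)
    PySem.Dict.empty (a := 0) (le_refl 0)
  simp only [Int.toNat_zero, List.drop_zero] at h
  congr 1
  exact h.trans (by rw [← List.foldl_flatten, dict_step_eq, ← PySem.Dict.counter_eq_foldl])

-- glue: a fold of an inner fold over g-images is the fold over the flattened map (two library rewrites)
theorem foldl_over_map_flatten {α β γ : Type} (g : α → List γ) (f : β → γ → β)
    (l : List α) (init : β) :
    ((l.map g).flatten).foldl f init = l.foldl (fun acc a => (g a).foldl f acc) init := by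
  rw [List.foldl_flatten, List.foldl_map]

theorem B_norm (dict : List (String × Int)) :
    diviseur_commun_alt dict =
      (PySem.Dict.counter ((dict.map (fun kv => Sd kv.2 2 ++ (Ld kv.2 2).reverse)).flatten)).items := by
  unfold diviseur_commun_alt
  have hbody : (fun (freq : PySem.Dict Int Int) (kv : String × Int) =>
      let p := altDivsLoop kv.2 2 [] []
      let freq := p.1.foldl (fun f d => f.insert d (f.getD d 0 + 1)) freq
      p.2.reverse.foldl (fun f d => f.insert d (f.getD d 0 + 1)) freq) =
      (fun freq kv => (Sd kv.2 2 ++ (Ld kv.2 2).reverse).foldl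
        (fun f d => f.insert d (f.getD d 0 + 1)) freq) := by
    funext freq kv
    simp only [List.foldl_append]
    rfl
  rw [hbody]
  congr 1
  rw [← PySem.Dict.foldl_insert_getD_add_one_eq_counter, foldl_over_map_flatten]

-- ===== VERDICT (by name: the statement is the Claim_ definition above) =====
theorem diviseur_commun_spec : Claim_equal_diviseur_commun := by
  intro dict _
  show _ = _
  rw [A_norm, B_norm]
  congr 2
  exact congrArg List.flatten (List.map_congr_left (fun (kv : String × Int) _ => (bList_eq kv.2).symm))
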